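-- pv_equiv track=rewrite | github.com/HelloStan/EPI-Solutions | epi_judge_python/nearest_repeated_entries.py | find_nearest_repetition
-- ===== SOURCE A (Python) =====
-- def find_nearest_repetition(paragraph):
--     # TODO - you fill in here.
--     last_positions = {}
--     min_distances = {}
--
--     for i, word in enumerate(paragraph):
--         if word in last_positions:
--             last_position = last_positions[word]
--
--             if word in min_distances:
--                 min_distances[word] = min(min_distances[word], i - last_position)
--             else:
--                 min_distances[word] = i - last_position
--
--         last_positions[word] = i
--
--     min_distance = min(min_distances.values()) if len(min_distances) else -1
--
--     return min_distance
-- ===== SOURCE B (Python) =====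
-- def find_nearest_repetition(paragraph):
--     positions = {}
--     for i, word in enumerate(paragraph):
--         positions.setdefault(word, []).append(i)
--     best = -1
--     for idx_list in positions.values():
--         for a, b in zip(idx_list, idx_list[1:]):
--             d = b - a
--             if best == -1 or d < best:
--                 best = d
--     return best
-- ===== Notes on version B (the rewrite author's own statement) =====
-- stated objective: alternative
-- what changed: B builds a full word-to-positions index in one pass and then reduces over that index (minimum of consecutive-position differences per word), instead of A's online tracking of last positions and per-word running minima with a final min over a minima dict.
import Mathlib
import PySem

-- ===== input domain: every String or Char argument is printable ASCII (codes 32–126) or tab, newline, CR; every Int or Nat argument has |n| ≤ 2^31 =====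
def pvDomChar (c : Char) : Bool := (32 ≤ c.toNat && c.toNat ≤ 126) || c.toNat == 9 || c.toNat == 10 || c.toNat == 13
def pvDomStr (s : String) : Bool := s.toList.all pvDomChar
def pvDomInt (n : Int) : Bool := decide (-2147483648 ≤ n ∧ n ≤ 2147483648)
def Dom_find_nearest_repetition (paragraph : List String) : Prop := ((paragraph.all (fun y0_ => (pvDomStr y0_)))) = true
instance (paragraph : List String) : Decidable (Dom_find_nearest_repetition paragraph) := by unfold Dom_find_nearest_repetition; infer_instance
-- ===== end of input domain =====

-- B replaces A's online per-word minimum tracking by a word→positions index built first,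
-- then a separate reduction over that index (objective: alternative decomposition, same O(n) cost).

-- ===== PORT A =====
-- one loop step of A: state = (last_positions, min_distances), p = (i, word)
def aStep (st : PySem.Dict String Int × PySem.Dict String Int) (p : Int × String) :
    PySem.Dict String Int × PySem.Dict String Int :=
  let md' :=
    match st.1.get? p.2 with
    | some last_position =>
        match st.2.get? p.2 with
        | some m => st.2.insert p.2 (min m (p.1 - last_position))
        | none => st.2.insert p.2 (p.1 - last_position)
    | none => st.2
  (st.1.insert p.2 p.1, md')

def find_nearest_repetition (paragraph : List String) : Int :=
  let st := (PySem.List.enumerate paragraph).foldl aStep (PySem.Dict.empty, PySem.Dict.empty)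
  -- 'min(min_distances.values()) if len(min_distances) else -1'; the guarded min is on a
  -- nonempty list, so the '.getD (-1)' default is never taken (totalisation only)
  if st.2.size ≠ 0 then (PySem.List.min? st.2.values (fun x => x)).getD (-1) else -1

-- ===== PORT B =====
-- inner loop body of B: running best over one consecutive pair pr = (a, b)
def bStep (best : Int) (pr : Int × Int) : Int :=
  let d := pr.2 - pr.1
  if best = -1 ∨ d < best then d else best

def find_nearest_repetition_alt (paragraph : List String) : Int :=
  let positions : PySem.Dict String (List Int) :=
    (PySem.List.enumerate paragraph).foldl
      (fun d p => d.modify p.2 [] (fun x => x ++ [p.1])) PySem.Dict.empty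
  positions.values.foldl
    (fun best idx_list =>
      (idx_list.zip (PySem.List.slice idx_list (some 1) none)).foldl bStep best)
    (-1)

-- ===== PRECONDITION & SPEC =====
def Spec_find_nearest_repetition (paragraph : List String) (out : Int) : Prop := out = find_nearest_repetition_alt paragraph
instance (paragraph : List String) (out : Int) : Decidable (Spec_find_nearest_repetition paragraph out) := by unfold Spec_find_nearest_repetition; infer_instance

-- ===== CLAIM (what is proved, stated in full; the proofs are below) =====
def Claim_equal_find_nearest_repetition : Prop := ∀ (paragraph : List String), Dom_find_nearest_repetition paragraph → Spec_find_nearest_repetition paragraph (find_nearest_repetition paragraph)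

-- ===== LEMMAS AND PROOFS =====

-- the positions (in order) at which word w occurs in l
def posList (w : String) (l : List String) : List Int :=
  ((PySem.List.enumerate l).filter (fun p => p.2 == w)).map (fun p => p.1)

-- consecutive differences of a list of positions
def gapsOf (xs : List Int) : List Int := (xs.zip xs.tail).map (fun p => p.2 - p.1)

-- all consecutive gaps, grouped by (distinct) word
def allGaps (l : List String) : List Int :=
  (PySem.List.dedup l).flatMap (fun w => gapsOf (posList w l))

def aState (l : List String) : PySem.Dict String Int × PySem.Dict String Int :=
  (PySem.List.enumerate l).foldl aStep (PySem.Dict.empty, PySem.Dict.empty)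

theorem gapsOf_append (xs : List Int) (y : Int) :
    gapsOf (xs ++ [y]) = gapsOf xs ++ (match xs.getLast? with | some a => [y - a] | none => []) := by
  induction xs with
  | nil => simp [gapsOf]
  | cons a t ih =>
    cases t with
    | nil => simp [gapsOf]
    | cons b t2 =>
      have h : gapsOf ((a :: b :: t2) ++ [y]) = (b - a) :: gapsOf ((b :: t2) ++ [y]) := rfl
      have h2 : gapsOf (a :: b :: t2) = (b - a) :: gapsOf (b :: t2) := rfl
      rw [h, h2, ih]
      simp

theorem min?_concat (xs : List Int) (y : Int) :
    PySem.List.min? (xs ++ [y]) (fun x => x) =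
      some (match PySem.List.min? xs (fun x => x) with | some m => min m y | none => y) := by
  cases xs with
  | nil =>
    have h0 : PySem.List.min? ([] : List Int) (fun x => x) = none :=
      (PySem.List.min?_eq_none_iff _ _).mpr rfl
    simp [PySem.List.min?_id_cons, h0]
  | cons x t =>
    rw [List.cons_append, PySem.List.min?_id_cons, PySem.List.min?_id_cons]
    simp [List.foldl_append]

theorem posList_append (w x : String) (l : List String) :
    posList w (l ++ [x]) = posList w l ++ (if x = w then [(l.length : Int)] else []) := by
  unfold posList
  rw [PySem.List.enumerate_append, List.filter_append, List.map_append]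
  congr 1
  simp [PySem.List.enumerate]
  split_ifs with h <;> simp [h]

theorem aState_append (l : List String) (x : String) :
    aState (l ++ [x]) = aStep (aState l) ((l.length : Int), x) := by
  unfold aState
  rw [PySem.List.enumerate_append, List.foldl_append]
  simp [PySem.List.enumerate]

theorem aState_inv (l : List String) :
    (∀ w, (aState l).1.get? w = (posList w l).getLast?) ∧
    (∀ w, (aState l).2.get? w = PySem.List.min? (gapsOf (posList w l)) (fun x => x)) ∧
    (aState l).2.keys.Nodup ∧
    (∀ w ∈ (aState l).2.keys, w ∈ l) := by
  induction l using List.reverseRecOn with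
  | nil =>
    have h0 : PySem.List.min? ([] : List Int) (fun x => x) = none :=
      (PySem.List.min?_eq_none_iff _ _).mpr rfl
    refine ⟨?_, ?_, ?_, ?_⟩ <;>
      simp [aState, PySem.List.enumerate, posList, gapsOf, h0]
  | append_singleton l x ih =>
    obtain ⟨ha, hb, hc, hd⟩ := ih
    rw [aState_append]
    have hax := ha x
    cases hlast : (posList x l).getLast? with
    | none =>
      rw [hlast] at hax
      have hpos : posList x l = [] := by
        cases h : posList x l with
        | nil => rfl
        | cons p t => rw [h] at hlast; simp at hlast
      have hstep : aStep (aState l) ((l.length : Int), x) =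
          ((aState l).1.insert x (l.length : Int), (aState l).2) := by
        show (_, _) = _
        rw [hax]
      rw [hstep]
      refine ⟨?_, ?_, hc, ?_⟩
      · intro w
        rw [PySem.Dict.get?_insert, posList_append]
        by_cases hw : w = x
        · subst hw; rw [hpos]; simp
        · have : ¬ (x = w) := fun h => hw h.symm
          simp [hw, this, ha w]
      · intro w
        rw [posList_append]
        by_cases hw : w = x
        · subst hw
          rw [hpos]
          simp only [if_true]
          have h1 : gapsOf ([] ++ [(l.length : Int)]) = [] := rfl
          have h2 : gapsOf ([] : List Int) = [] := rfl
          rw [h1]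
          have := hb w
          rw [hpos, h2] at this
          exact this
        · have : ¬ (x = w) := fun h => hw h.symm
          simp only [this, if_false, List.append_nil]
          exact hb w
      · intro w hw
        exact List.mem_append_left _ (hd w hw)
    | some last =>
      rw [hlast] at hax
      have hbx := hb x
      have hstep : aStep (aState l) ((l.length : Int), x) =
          ((aState l).1.insert x (l.length : Int),
           (aState l).2.insert x
             (match (aState l).2.get? x with
              | some m => min m ((l.length : Int) - last)
              | none => (l.length : Int) - last)) := by
        show (_, _) = _
        rw [hax]
        cases h : (aState l).2.get? x <;> rfl
      rw [hstep]
      refine ⟨?_, ?_, PySem.Dict.nodup_keys_insert _ _ _ hc, ?_⟩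
      · intro w
        rw [PySem.Dict.get?_insert, posList_append]
        by_cases hw : w = x
        · subst hw; simp
        · have : ¬ (x = w) := fun h => hw h.symm
          simp [hw, this, ha w]
      · intro w
        rw [PySem.Dict.get?_insert, posList_append]
        by_cases hw : w = x
        · subst hw
          simp only [if_true]
          rw [gapsOf_append, hlast, min?_concat, hbx]
        · have : ¬ (x = w) := fun h => hw h.symm
          simp only [hw, if_false, this, List.append_nil]
          exact hb w
      · intro w hw
        rw [PySem.Dict.mem_keys_insert] at hw
        cases hw with
        | inl h => subst h; exact List.mem_append_right _ (List.mem_singleton.mpr rfl)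
        | inr h => exact List.mem_append_left _ (hd w h)

theorem minSetEq (xs ys : List Int)
    (h1 : ∀ v ∈ xs, v ∈ ys)
    (h2 : ∀ g ∈ ys, ∃ v ∈ xs, v ≤ g) :
    PySem.List.min? xs (fun x => x) = PySem.List.min? ys (fun x => x) := by
  cases hx : PySem.List.min? xs (fun x => x) with
  | none =>
    rw [PySem.List.min?_eq_none_iff] at hx
    subst hx
    cases hy : PySem.List.min? ys (fun x => x) with
    | none => rfl
    | some b =>
      have hb := PySem.List.min?_mem hy
      obtain ⟨v, hv, _⟩ := h2 b hb
      simp at hv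
  | some a =>
    cases hy : PySem.List.min? ys (fun x => x) with
    | none =>
      rw [PySem.List.min?_eq_none_iff] at hy
      subst hy
      have := h1 a (PySem.List.min?_mem hx)
      simp at this
    | some b =>
      have hax := PySem.List.min?_mem hx
      have hay := h1 a hax
      have hby := PySem.List.min?_mem hy
      have h_b_le_a : b ≤ a := PySem.List.min?_isMin hy a hay
      obtain ⟨v, hvx, hvb⟩ := h2 b hby
      have h_a_le_v : a ≤ v := PySem.List.min?_isMin hx v hvx
      simp only [Option.some.injEq]
      omega

theorem A_eq_min_allGaps (l : List String) :
    find_nearest_repetition l = (PySem.List.min? (allGaps l) (fun x => x)).getD (-1) := by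
  obtain ⟨ha, hb, hc, hd⟩ := aState_inv l
  have hkey : PySem.List.min? (aState l).2.values (fun x => x)
      = PySem.List.min? (allGaps l) (fun x => x) := by
    apply minSetEq
    · intro v hv
      obtain ⟨⟨k, v'⟩, hp, hpv⟩ := List.mem_map.mp hv
      cases hpv
      have hget : (aState l).2.get? k = some v' := PySem.Dict.get?_of_mem_items _ hp hc
      rw [hb k] at hget
      have hmem := PySem.List.min?_mem hget
      have hkl : k ∈ l := hd k (PySem.Dict.mem_keys_of_mem_items _ hp)
      exact List.mem_flatMap.mpr ⟨k, (PySem.List.mem_dedup l k).mpr hkl, hmem⟩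
    · intro g hg
      obtain ⟨w, hw, hgw⟩ := List.mem_flatMap.mp hg
      have hne : gapsOf (posList w l) ≠ [] := List.ne_nil_of_mem hgw
      cases hmw : PySem.List.min? (gapsOf (posList w l)) (fun x => x) with
      | none => exact absurd ((PySem.List.min?_eq_none_iff _ _).mp hmw) hne
      | some m =>
        have hget : (aState l).2.get? w = some m := by rw [hb w, hmw]
        have hitems := PySem.Dict.mem_items_of_get?_eq_some _ hget
        exact ⟨m, List.mem_map.mpr ⟨(w, m), hitems, rfl⟩, PySem.List.min?_isMin hmw g hgw⟩
  have hA : find_nearest_repetition l =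
      (if (aState l).2.size ≠ 0 then (PySem.List.min? (aState l).2.values (fun x => x)).getD (-1) else -1) := rfl
  rw [hA]
  by_cases hs : (aState l).2.size = 0
  · have hitems : (aState l).2.items = [] := List.eq_nil_of_length_eq_zero hs
    have hvals : (aState l).2.values = [] := by
      rw [show (aState l).2.values = (aState l).2.items.map (fun p => p.2) from rfl, hitems]
      rfl
    have : PySem.List.min? (allGaps l) (fun x => x) = none := by
      rw [← hkey, hvals]
      exact (PySem.List.min?_eq_none_iff _ _).mpr rfl
    rw [this]
    simp [hs]
  · rw [hkey]
    simp [hs]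

def bPos (l : List String) : PySem.Dict String (List Int) :=
  (PySem.List.enumerate l).foldl (fun d p => d.modify p.2 [] (fun x => x ++ [p.1])) PySem.Dict.empty

theorem bPos_getD (l : List String) (w : String) : (bPos l).getD w [] = posList w l := by
  unfold bPos
  have h : (PySem.List.enumerate l).foldl
        (fun d p => d.modify p.2 [] (fun x => x ++ [p.1])) PySem.Dict.empty
      = ((PySem.List.enumerate l).map Prod.swap).foldl
        (fun d p => d.modify p.1 [] (fun x => x ++ [p.2])) PySem.Dict.empty := by
    rw [List.foldl_map]
    rfl
  rw [h, PySem.Dict.getD_foldl_modify_append]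
  simp [posList, List.filter_map, Function.comp_def, List.map_map]

theorem bPos_keys (l : List String) : (bPos l).keys = PySem.List.dedup l := by
  have h1 : (bPos l).keys =
      PySem.Set.update (PySem.Dict.empty : PySem.Dict String (List Int)).keys
        ((PySem.List.enumerate l).map (fun p => p.2)) :=
    PySem.Dict.keys_foldl_modify_key _ _ _ _ _
  rw [h1, PySem.List.map_snd_enumerate, PySem.List.dedup_eq_ofList]
  rfl

theorem bPos_values (l : List String) :
    (bPos l).values = (PySem.List.dedup l).map (fun w => posList w l) := by
  have hnd : (bPos l).keys.Nodup :=
    PySem.Dict.nodup_keys_foldl_modify_key _ _ _ _ _ PySem.Dict.nodup_keys_empty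
  rw [PySem.Dict.values_eq_map_keys _ hnd [], bPos_keys]
  exact List.map_congr_left (fun w _ => bPos_getD l w)

theorem posList_pairwise (w : String) (l : List String) : (posList w l).Pairwise (· < ·) := by
  unfold posList
  rw [List.pairwise_map]
  exact List.Pairwise.filter _ (PySem.List.pairwise_lt_enumerate l 0)

theorem gaps_pos (xs : List Int) (h : xs.Pairwise (· < ·)) : ∀ g ∈ gapsOf xs, 0 < g := by
  induction xs with
  | nil => intro g hg; simp [gapsOf] at hg
  | cons a t ih =>
    cases t with
    | nil => intro g hg; simp [gapsOf] at hg
    | cons b t2 =>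
      intro g hg
      have hab : a < b := (List.pairwise_cons.mp h).1 b (List.mem_cons_self)
      have ht : (b :: t2).Pairwise (· < ·) := (List.pairwise_cons.mp h).2
      have hg' : g ∈ (b - a) :: gapsOf (b :: t2) := hg
      cases List.mem_cons.mp hg' with
      | inl h1 => omega
      | inr h2 => exact ih ht g h2

theorem foldl_bStep_min (t : List Int) (b : Int) (hb : 0 < b) (ht : ∀ g ∈ t, 0 < g) :
    t.foldl (fun best d => if best = -1 ∨ d < best then d else best) b = t.foldl min b := by
  induction t generalizing b with
  | nil => rfl
  | cons g t2 ih =>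
    have hg : 0 < g := ht g List.mem_cons_self
    have hstep : (if b = -1 ∨ g < b then g else b) = min b g := by
      split_ifs with h
      · rcases h with h | h
        · omega
        · rw [min_eq_right (le_of_lt h)]
      · push Not at h
        rw [min_eq_left h.2]
    rw [List.foldl_cons, List.foldl_cons, hstep]
    exact ih (min b g) (lt_min hb hg) (fun x hx => ht x (List.mem_cons_of_mem _ hx))

theorem foldl_bStep_eq_min? (gs : List Int) (h : ∀ g ∈ gs, 0 < g) :
    gs.foldl (fun best d => if best = -1 ∨ d < best then d else best) (-1) =
      (PySem.List.min? gs (fun x => x)).getD (-1) := by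
  cases gs with
  | nil => rfl
  | cons g t =>
    rw [PySem.List.min?_id_cons]
    have h0 : ((-1 : Int) = -1 ∨ g < -1) := Or.inl rfl
    rw [List.foldl_cons, if_pos h0]
    rw [foldl_bStep_min t g (h g List.mem_cons_self) (fun x hx => h x (List.mem_cons_of_mem _ hx))]
    rfl

theorem foldl_foldl_flat (g : List Int → List Int) (s : Int → Int → Int) (ls : List (List Int)) (b : Int) :
    ls.foldl (fun b idxs => (g idxs).foldl s b) b = (ls.flatMap g).foldl s b := by
  induction ls generalizing b with
  | nil => rfl
  | cons x ls2 ih =>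
    rw [List.flatMap_cons, List.foldl_append, List.foldl_cons]
    exact ih _

theorem B_eq_min_allGaps (l : List String) :
    find_nearest_repetition_alt l = (PySem.List.min? (allGaps l) (fun x => x)).getD (-1) := by
  have h1 : find_nearest_repetition_alt l =
      (bPos l).values.foldl
        (fun best idxs =>
          (gapsOf idxs).foldl (fun best d => if best = -1 ∨ d < best then d else best) best)
        (-1) := by
    show (bPos l).values.foldl
        (fun best idx_list =>
          (idx_list.zip (PySem.List.slice idx_list (some 1) none)).foldl bStep best) (-1) = _
    congr 1
    funext best idxs
    rw [PySem.List.slice_from_one]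
    show (idxs.zip idxs.tail).foldl bStep best = _
    rw [gapsOf, List.foldl_map]
    rfl
  have hpos : ∀ g ∈ allGaps l, 0 < g := by
    intro g hg
    obtain ⟨w, _, hgw⟩ := List.mem_flatMap.mp hg
    exact gaps_pos _ (posList_pairwise w l) g hgw
  rw [h1, foldl_foldl_flat gapsOf, bPos_values, List.flatMap_map]
  exact foldl_bStep_eq_min? _ hpos

-- ===== VERDICT (by name: the statement is the Claim_ definition above) =====
theorem find_nearest_repetition_spec : Claim_equal_find_nearest_repetition := by
  intro l _
  unfold Spec_find_nearest_repetition
  rw [A_eq_min_allGaps, B_eq_min_allGaps]
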